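-- pv_equiv track=rewrite | github.com/h2oai/h2o-3 | h2o-test-feature/feature/feature_space.py | combine_subspace_samplings
-- ===== SOURCE A (Python) =====
-- import itertools
--
-- def combine_subspace_samplings(subspace_samplings, method="cartesian"):
--   """
--   Combine subspace samplings. For example, given a DataArgSpace and a FeatureArgSpace, samplings of each subspace
--   can be computed with DataArgSpace.sample() and FeatureArgSpace.sample(), giving
--   [{"DataArgSpace.name":Dataset1}, {"DataArgSpace.name":Dataset2}, ...] and
--   [{"ParameterArgSpace.name":Value1}, {"ParameterArgSpace.name":Value2}, ...], respectively. This routine combines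
--   these samplings according to the `method` option. The result is a list of "points" in the FeatureSpace, which
--   may look something like
--   [{"DataArgSpace.name":Dataset1, "ParameterArgSpace.name":Value1},
--    {"DataArgSpace.name":Dataset2, "ParameterArgSpace.name":Value1},
--    {"DataArgSpace.name":Dataset1, "ParameterArgSpace.name":Value2},
--    {"DataArgSpace.name":Dataset2, "ParameterArgSpace.name":Value2}]
--   :param subspace_samplings: a list of samplings from various subspaces. (list)
--   :param method: the method of combination
--   :return:
--   """
--
--   points = []
--   if method == "cartesian":
--     for e in itertools.product(*subspace_samplings):
--       z = {}
--       for d in e: z.update(d)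
--       points.append(z)
--   else:
--     raise(ValueError, "Only cartesian method is implemented!")
--
--   return points
-- ===== SOURCE B (Python) =====
-- def combine_subspace_samplings(subspace_samplings, method="cartesian"):
--   if method != "cartesian":
--     raise(ValueError, "Only cartesian method is implemented!")
--   points = [{}]
--   for subspace in subspace_samplings:
--     points = [{**p, **d} for p in points for d in subspace]
--   return points
-- ===== Notes on version B (the rewrite author's own statement) =====
-- stated objective: simpler
-- what changed: Replaces itertools.product plus an inner dict-update loop per tuple with a single left fold that grows the list of merged points one subspace at a time, never materializing tuples.
import Mathlib
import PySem

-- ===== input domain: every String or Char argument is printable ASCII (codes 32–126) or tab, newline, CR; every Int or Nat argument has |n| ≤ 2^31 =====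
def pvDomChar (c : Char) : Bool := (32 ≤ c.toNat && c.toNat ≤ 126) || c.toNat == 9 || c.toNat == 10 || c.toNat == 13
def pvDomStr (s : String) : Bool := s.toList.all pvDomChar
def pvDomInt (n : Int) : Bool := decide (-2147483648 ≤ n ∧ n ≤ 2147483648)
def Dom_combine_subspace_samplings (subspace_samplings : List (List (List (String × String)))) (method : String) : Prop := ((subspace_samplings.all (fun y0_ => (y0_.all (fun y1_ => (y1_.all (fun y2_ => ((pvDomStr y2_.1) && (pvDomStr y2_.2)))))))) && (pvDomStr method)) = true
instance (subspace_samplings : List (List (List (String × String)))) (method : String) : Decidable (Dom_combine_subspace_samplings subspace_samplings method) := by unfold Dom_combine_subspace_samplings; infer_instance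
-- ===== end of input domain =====

-- B replaces itertools.product + per-tuple dict-update loop by a single left fold that
-- grows the list of merged points one subspace at a time (objective: simpler decomposition).


-- ===== PORT A =====
-- itertools.product(*lists) transliterated per its documented implementation:
-- result = [[]]; for pool in lists: result = [t+[x] for t in result for x in pool]
def pyProduct (lists : List (List (List (String × String)))) : List (List (List (String × String))) :=
  lists.foldl (fun acc pool => acc.flatMap (fun t => pool.map (fun x => t ++ [x]))) [[]]

def combine_subspace_samplings (subspace_samplings : List (List (List (String × String)))) (method : String) : List (List (String × String)) :=
  if method = "cartesian" then
    (pyProduct subspace_samplings).map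
      (fun e => (e.foldl (fun z d => z.update d) (PySem.Dict.empty : PySem.Dict String String)).items)
  else []  -- Python raises here; excluded by Pre_

-- ===== PORT B =====
def combine_subspace_samplings_alt (subspace_samplings : List (List (List (String × String)))) (method : String) : List (List (String × String)) :=
  if method = "cartesian" then
    (subspace_samplings.foldl
        (fun pts subspace => pts.flatMap (fun p => subspace.map (fun d => p.update d)))
        [(PySem.Dict.empty : PySem.Dict String String)]).map (·.items)
  else []  -- Python raises here; excluded by Pre_

-- ===== PRECONDITION & SPEC =====
-- Pre_ excludes only method ≠ "cartesian", where A raises.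
def Pre_combine_subspace_samplings (subspace_samplings : List (List (List (String × String)))) (method : String) : Prop := method = "cartesian"
instance (subspace_samplings : List (List (List (String × String)))) (method : String) : Decidable (Pre_combine_subspace_samplings subspace_samplings method) := by unfold Pre_combine_subspace_samplings; infer_instance
def pvWitness_combine_subspace_samplings : (List (List (List (String × String)))) × String :=
  ([[[("a", "1")], [("a", "2")]], [[("b", "x")]]], "cartesian")
def Spec_combine_subspace_samplings (subspace_samplings : List (List (List (String × String)))) (method : String) (out : List (List (String × String))) : Prop := out = combine_subspace_samplings_alt subspace_samplings method
instance (subspace_samplings : List (List (List (String × String)))) (method : String) (out : List (List (String × String))) : Decidable (Spec_combine_subspace_samplings subspace_samplings method out) := by unfold Spec_combine_subspace_samplings; infer_instance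

-- ===== CLAIM (what is proved, stated in full; the proofs are below) =====
def Claim_equal_combine_subspace_samplings : Prop := ∀ (subspace_samplings : List (List (List (String × String)))) (method : String), Dom_combine_subspace_samplings subspace_samplings method → Pre_combine_subspace_samplings subspace_samplings method → Spec_combine_subspace_samplings subspace_samplings method (combine_subspace_samplings subspace_samplings method)

-- ===== LEMMAS AND PROOFS =====
-- Merging a tuple produced by the product fold equals B's incremental merge fold.
theorem product_map_merge (ss : List (List (List (String × String))))
    (acc : List (List (List (String × String)))) :
    (ss.foldl (fun a pool => a.flatMap (fun t => pool.map (fun x => t ++ [x]))) acc).map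
        (fun e => e.foldl (fun z d => z.update d) (PySem.Dict.empty : PySem.Dict String String))
      = ss.foldl (fun pts subspace => pts.flatMap (fun p => subspace.map (fun d => p.update d)))
          (acc.map (fun e => e.foldl (fun z d => z.update d) (PySem.Dict.empty : PySem.Dict String String))) := by
  induction ss generalizing acc with
  | nil => simp
  | cons pool rest ih =>
    simp only [List.foldl_cons]
    rw [ih]
    have hpt : ∀ (a : List (List (String × String))),
        ((fun e => List.foldl (fun z d => z.update d) (PySem.Dict.empty : PySem.Dict String String) e) ∘ fun x => a ++ [x])
          = fun d => (List.foldl (fun z d => z.update d) (PySem.Dict.empty : PySem.Dict String String) a).update d := by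
      intro a; funext x; simp [Function.comp, List.foldl_append]
    simp only [List.map_flatMap, List.flatMap_map, List.map_map, hpt]

-- ===== VERDICT (by name: the statement is the Claim_ definition above) =====
theorem combine_subspace_samplings_spec : Claim_equal_combine_subspace_samplings := by
  intro ss method _ hpre
  unfold Pre_combine_subspace_samplings at hpre
  unfold Spec_combine_subspace_samplings combine_subspace_samplings combine_subspace_samplings_alt pyProduct
  rw [if_pos hpre, if_pos hpre]
  have h := congrArg (List.map PySem.Dict.items) (product_map_merge ss [[]])
  simpa [List.map_map, Function.comp] using h
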